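-- pv_equiv track=rewrite | github.com/AiGenics-IT/ComplyTrade | StandAloneSystem/lc_ocr.py | _fix_oversplitting
-- ===== SOURCE A (Python) =====
-- def _fix_oversplitting(text: str) -> str:
--     """
--     Fix cases where words were incorrectly split
--     """
--     # Common oversplitting issues
--     fixes = {
--         'DOCU MENTARY': 'DOCUMENTARY',
--         'DOCU MENT': 'DOCUMENT',
--         'EVID ENCE': 'EVIDENCE',
--         'AUTH ORITY': 'AUTHORITY',
--         'CERTIF ICATE': 'CERTIFICATE',
--         'SHIPME NT': 'SHIPMENT',
--         'PAYME NT': 'PAYMENT',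
--         'REQU IRED': 'REQUIRED',
--     }
--
--     for wrong, correct in fixes.items():
--         text = text.replace(wrong, correct)
--
--     return text
-- ===== SOURCE B (Python) =====
-- def _fix_oversplitting(text: str) -> str:
--     """
--     Fix cases where words were incorrectly split
--     """
--     fixes = [
--         ('DOCU MENTARY', 'DOCUMENTARY'),
--         ('DOCU MENT', 'DOCUMENT'),
--         ('EVID ENCE', 'EVIDENCE'),
--         ('AUTH ORITY', 'AUTHORITY'),
--         ('CERTIF ICATE', 'CERTIFICATE'),
--         ('SHIPME NT', 'SHIPMENT'),
--         ('PAYME NT', 'PAYMENT'),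
--         ('REQU IRED', 'REQUIRED'),
--     ]
--
--     def unsplit(t, wrong, correct):
--         # collapse every occurrence by splitting on it and re-joining
--         return correct.join(t.split(wrong))
--
--     def go(t, remaining):
--         if not remaining:
--             return t
--         wrong, correct = remaining[0]
--         return go(unsplit(t, wrong, correct), remaining[1:])
--
--     return go(text, fixes)
-- ===== Notes on version B (the rewrite author's own statement) =====
-- stated objective: alternative
-- what changed: Replaces A's dict-driven for loop of str.replace passes by a recursion over the fix list whose per-pass replacement is correct.join(text.split(wrong)), proved equal to str.replace for each non-empty pattern.
import Mathlib
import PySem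

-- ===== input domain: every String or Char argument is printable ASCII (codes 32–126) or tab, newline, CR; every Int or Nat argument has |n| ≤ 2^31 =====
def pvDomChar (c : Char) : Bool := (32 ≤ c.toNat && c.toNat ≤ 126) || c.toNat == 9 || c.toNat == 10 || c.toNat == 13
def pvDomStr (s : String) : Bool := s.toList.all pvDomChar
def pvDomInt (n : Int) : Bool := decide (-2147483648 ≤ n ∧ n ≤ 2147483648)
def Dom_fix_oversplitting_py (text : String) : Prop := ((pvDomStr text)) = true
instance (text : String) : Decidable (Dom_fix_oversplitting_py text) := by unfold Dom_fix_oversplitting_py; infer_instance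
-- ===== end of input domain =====

-- B re-decomposes A's dict/for-loop of str.replace passes as a recursion over the fix list
-- whose per-pass replacement is correct.join(t.split(wrong)) (objective: alternative; same result).

-- ===== PORT A =====
def fix_oversplitting_py (text : String) : String :=
  let t1 := PySem.Str.replace text "DOCU MENTARY" "DOCUMENTARY"
  let t2 := PySem.Str.replace t1 "DOCU MENT" "DOCUMENT"
  let t3 := PySem.Str.replace t2 "EVID ENCE" "EVIDENCE"
  let t4 := PySem.Str.replace t3 "AUTH ORITY" "AUTHORITY"
  let t5 := PySem.Str.replace t4 "CERTIF ICATE" "CERTIFICATE"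
  let t6 := PySem.Str.replace t5 "SHIPME NT" "SHIPMENT"
  let t7 := PySem.Str.replace t6 "PAYME NT" "PAYMENT"
  let t8 := PySem.Str.replace t7 "REQU IRED" "REQUIRED"
  t8

-- ===== PORT B =====
-- Source B's fixes list, in its order
def pvFixesB : List (String × String) :=
  [("DOCU MENTARY", "DOCUMENTARY"),
   ("DOCU MENT", "DOCUMENT"),
   ("EVID ENCE", "EVIDENCE"),
   ("AUTH ORITY", "AUTHORITY"),
   ("CERTIF ICATE", "CERTIFICATE"),
   ("SHIPME NT", "SHIPMENT"),
   ("PAYME NT", "PAYMENT"),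
   ("REQU IRED", "REQUIRED")]

-- Source B's unsplit: correct.join(t.split(wrong)); t.split(wrong) for the nonempty literal
-- separators here is PySem.Chars.splitOn
def pvUnsplit (t wrong correct : String) : String :=
  PySem.Str.join correct ((PySem.Chars.splitOn t.toList wrong.toList).map String.ofList)

-- Source B's go: recursion over the remaining fixes
def pvGoB : String → List (String × String) → String
  | t, [] => t
  | t, (w, c) :: rest => pvGoB (pvUnsplit t w c) rest

def fix_oversplitting_py_alt (text : String) : String := pvGoB text pvFixesB

-- ===== PRECONDITION & SPEC =====
def Spec_fix_oversplitting_py (text : String) (out : String) : Prop := out = fix_oversplitting_py_alt text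
instance (text : String) (out : String) : Decidable (Spec_fix_oversplitting_py text out) := by unfold Spec_fix_oversplitting_py; infer_instance

-- ===== CLAIM (what is proved, stated in full; the proofs are below) =====
def Claim_equal_fix_oversplitting_py : Prop := ∀ (text : String), Dom_fix_oversplitting_py text → Spec_fix_oversplitting_py text (fix_oversplitting_py text)

-- ===== LEMMAS AND PROOFS =====

-- structural characterisation of Python str.replace (nonempty pattern): scan, skip past matches
def pvRep (p v : List Char) (l : List Char) : List Char :=
  if _hp : p = [] then l else
  match l with
  | [] => []
  | c :: t =>
    if p.isPrefixOf (c :: t) then v ++ pvRep p v ((c :: t).drop p.length)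
    else c :: pvRep p v t
termination_by l.length
decreasing_by
  · have : 0 < p.length := List.length_pos_iff.mpr _hp
    simp; omega
  · simp

theorem pvRepGo_eq (p v : List Char) (hp : p ≠ []) :
    ∀ (fuel : Nat) (l acc : List Char), l.length ≤ fuel →
    PySem.Chars.replace.go p v fuel l acc = acc.reverse ++ pvRep p v l := by
  intro fuel
  induction fuel with
  | zero =>
    intro l acc h
    have hl : l = [] := by cases l <;> simp_all
    subst hl
    simp [PySem.Chars.replace.go, pvRep]
  | succ n ih =>
    intro l acc h
    match l with
    | [] => simp [PySem.Chars.replace.go, pvRep, hp]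
    | c :: t =>
      rw [PySem.Chars.replace.go]
      by_cases hpre : p.isPrefixOf (c :: t)
      · rw [if_pos hpre, ih _ _ (by
          have : 0 < p.length := List.length_pos_iff.mpr hp
          simp at h ⊢; omega)]
        rw [pvRep]
        simp [hp, hpre]
      · rw [if_neg hpre, ih _ _ (by simp at h ⊢; omega)]
        rw [pvRep]
        simp [hp, hpre]

theorem pvReplace_eq (l p v : List Char) (hp : p ≠ []) :
    PySem.Chars.replace l p v = pvRep p v l := by
  rw [PySem.Chars.replace]
  simp [List.isEmpty_iff, hp, pvRepGo_eq p v hp l.length l [] (le_refl _)]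

-- structural characterisation of Python str.split(sep) (nonempty separator)
def pvSplit (w : List Char) (l : List Char) : List (List Char) :=
  if _hw : w = [] then [l] else
  match l with
  | [] => [[]]
  | c :: t =>
    if w.isPrefixOf (c :: t) then [] :: pvSplit w ((c :: t).drop w.length)
    else (pvSplit w t).modifyHead (c :: ·)
termination_by l.length
decreasing_by
  · have : 0 < w.length := List.length_pos_iff.mpr _hw
    simp; omega
  · simp

theorem pvSplit_ne_nil (w l : List Char) : pvSplit w l ≠ [] := by
  fun_induction pvSplit w l with
  | case1 => simp
  | case2 => simp
  | case3 => simp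
  | case4 _ c t _ ih =>
    rcases h : pvSplit w t with _ | ⟨x, xs⟩
    · exact absurd h ih
    · simp

theorem pvSplitGo_eq (sep : List Char) (hs : sep ≠ []) :
    ∀ (fuel : Nat) (l cur : List Char) (acc : List (List Char)), l.length ≤ fuel →
    PySem.Chars.splitOn.go sep fuel l cur acc
      = acc.reverse ++ (pvSplit sep l).modifyHead (cur.reverse ++ ·) := by
  intro fuel
  induction fuel with
  | zero =>
    intro l cur acc h
    have hl : l = [] := by cases l <;> simp_all
    subst hl
    rw [PySem.Chars.splitOn.go, pvSplit]
    simp [hs]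
  | succ n ih =>
    intro l cur acc h
    match l with
    | [] =>
      rw [PySem.Chars.splitOn.go, pvSplit]
      simp [hs]
      omega
    | c :: t =>
      rw [PySem.Chars.splitOn.go]
      by_cases hpre : sep.isPrefixOf (c :: t)
      · rw [if_pos hpre, ih _ _ _ (by
          have : 0 < sep.length := List.length_pos_iff.mpr hs
          simp at h ⊢; omega)]
        rw [pvSplit]
        simp only [hs, hpre, dite_eq_ite, if_false, if_true, List.reverse_nil,
          List.nil_append, List.modifyHead]
        rcases pvSplit sep (List.drop sep.length (c :: t)) with _ | ⟨x, xs⟩ <;> simp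
      · rw [if_neg hpre, ih _ _ _ (by simp at h ⊢; omega)]
        rw [pvSplit]
        simp only [hs, hpre, dite_eq_ite, if_false, Bool.false_eq_true]
        rcases hps : pvSplit sep t with _ | ⟨x, xs⟩
        · exact absurd hps (pvSplit_ne_nil sep t)
        · simp

theorem pvSplitOn_eq (l sep : List Char) (hs : sep ≠ []) :
    PySem.Chars.splitOn l sep = pvSplit sep l := by
  rw [PySem.Chars.splitOn, pvSplitGo_eq sep hs _ l [] [] (by omega)]
  rcases hps : pvSplit sep l with _ | ⟨x, xs⟩
  · exact absurd hps (pvSplit_ne_nil sep l)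
  · simp

theorem pvJoin_modifyHead (c u : List Char) (ps : List (List Char)) (hps : ps ≠ []) :
    PySem.Chars.join c (ps.modifyHead (u ++ ·)) = u ++ PySem.Chars.join c ps := by
  rcases ps with _ | ⟨x, xs⟩
  · exact absurd rfl hps
  · rcases xs with _ | ⟨y, ys⟩
    · simp [PySem.Chars.join, List.intercalate]
    · simp [PySem.Chars.join, List.intercalate]

-- the key per-pass fact: correct.join(t.split(wrong)) = t.replace(wrong, correct)
theorem pvJoinSplit (w c : List Char) (hw : w ≠ []) :
    ∀ (n : Nat) (l : List Char), l.length ≤ n →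
    PySem.Chars.join c (pvSplit w l) = pvRep w c l := by
  intro n
  induction n with
  | zero =>
    intro l h
    have hl : l = [] := by cases l <;> simp_all
    subst hl
    rw [pvSplit, pvRep]
    simp [hw, PySem.Chars.join, List.intercalate]
  | succ n ih =>
    intro l h
    match l with
    | [] =>
      rw [pvSplit, pvRep]
      simp [hw, PySem.Chars.join, List.intercalate]
    | c0 :: t =>
      rw [pvSplit, pvRep]
      by_cases hpre : w.isPrefixOf (c0 :: t)
      · simp only [hw, hpre, dite_eq_ite, if_false, if_true]
        have hd : ((c0 :: t).drop w.length).length ≤ n := by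
          have : 0 < w.length := List.length_pos_iff.mpr hw
          simp at h ⊢; omega
        rcases hps : pvSplit w ((c0 :: t).drop w.length) with _ | ⟨x, xs⟩
        · exact absurd hps (pvSplit_ne_nil _ _)
        · have := ih ((c0 :: t).drop w.length) hd
          rw [hps] at this
          simp [PySem.Chars.join, List.intercalate] at this ⊢
          rw [this]
      · simp only [hw, hpre, dite_eq_ite, if_false, Bool.false_eq_true]
        have hmod : (pvSplit w t).modifyHead (c0 :: ·)
            = (pvSplit w t).modifyHead ([c0] ++ ·) := by
          rcases pvSplit w t with _ | ⟨x, xs⟩ <;> simp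
        rw [hmod, pvJoin_modifyHead c [c0] _ (pvSplit_ne_nil w t),
            ih t (by simp at h; omega)]
        simp

theorem pvUnsplit_eq_replace (t w c : String) (hw : w.toList ≠ []) :
    pvUnsplit t w c = PySem.Str.replace t w c := by
  rw [pvUnsplit, PySem.Str.replace, PySem.Str.join]
  congr 1
  rw [pvSplitOn_eq _ _ hw, pvReplace_eq _ _ _ hw]
  rw [List.map_map]
  have hm : (List.map (String.toList ∘ String.ofList) (pvSplit w.toList t.toList))
      = pvSplit w.toList t.toList := by
    apply List.map_id'' -- f x = x pointwise
    intro x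
    simp
  rw [hm, pvJoinSplit w.toList c.toList hw t.toList.length t.toList (le_refl _)]

-- ===== VERDICT (by name: the statement is the Claim_ definition above) =====
theorem fix_oversplitting_py_spec : Claim_equal_fix_oversplitting_py := by
  intro text _
  unfold Spec_fix_oversplitting_py fix_oversplitting_py_alt pvFixesB
  rw [pvGoB, pvGoB, pvGoB, pvGoB, pvGoB, pvGoB, pvGoB, pvGoB, pvGoB]
  rw [pvUnsplit_eq_replace _ _ _ (by decide), pvUnsplit_eq_replace _ _ _ (by decide),
      pvUnsplit_eq_replace _ _ _ (by decide), pvUnsplit_eq_replace _ _ _ (by decide),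
      pvUnsplit_eq_replace _ _ _ (by decide), pvUnsplit_eq_replace _ _ _ (by decide),
      pvUnsplit_eq_replace _ _ _ (by decide), pvUnsplit_eq_replace _ _ _ (by decide)]
  rfl
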